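-- pv_equiv track=rewrite | github.com/JunOnJuly/TIL | python_code/BaekJoon/2775.py | fide_pop
-- ===== SOURCE A (Python) =====
-- def fide_pop(k, n):
--     if k == 0:
--         return list(range(1, n + 1))
--     new_list = []
--     list_temp = fide_pop(k - 1, n)
--     for i in range(n):
--         new_list.append(sum(list_temp[:i + 1]))
--     return new_list
-- ===== SOURCE B (Python) =====
-- def fide_pop(k, n):
--     # Iterative: start from the ground floor and take running prefix sums k times.
--     row = list(range(1, n + 1))
--     for _ in range(k):
--         s = 0
--         nxt = []
--         for x in row:
--             s += x
--             nxt.append(s)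
--         row = nxt
--     return row
-- ===== Notes on version B (the rewrite author's own statement) =====
-- stated objective: faster
-- what changed: Replaced A's recursion with per-element re-summation of slices (sum(list_temp[:i+1]) for each i) by an iterative loop that maintains a single running prefix sum per level.
import Mathlib
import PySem

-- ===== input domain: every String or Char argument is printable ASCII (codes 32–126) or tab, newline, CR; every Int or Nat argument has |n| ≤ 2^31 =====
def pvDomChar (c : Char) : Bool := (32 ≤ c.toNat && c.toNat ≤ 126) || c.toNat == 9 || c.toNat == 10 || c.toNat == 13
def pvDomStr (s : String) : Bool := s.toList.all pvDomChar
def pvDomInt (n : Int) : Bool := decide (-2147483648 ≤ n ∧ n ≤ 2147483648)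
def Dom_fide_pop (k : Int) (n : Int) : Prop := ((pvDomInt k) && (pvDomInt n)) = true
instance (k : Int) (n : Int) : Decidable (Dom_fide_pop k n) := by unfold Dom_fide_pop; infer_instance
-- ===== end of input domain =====

-- B replaces A's recursive per-element slice re-summation by an iterative running prefix sum per level (same values, fewer additions).


-- ===== PORT A =====
-- recursion on k (Python recurses with k-1 until k == 0); faithful for k ≥ 0 (Pre_)
def fideGoA : Nat → Int → List Int
  | 0, n => PySem.List.pyRange 1 (n + 1) 1
  | m + 1, n =>
    let listTemp := fideGoA m n
    (PySem.List.pyRange 0 n 1).foldl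
      (fun newList i => newList ++ [(PySem.List.slice listTemp none (some (i + 1))).sum]) []

def fide_pop (k : Int) (n : Int) : List Int := fideGoA k.toNat n

-- ===== PORT B =====
-- one level of B: running sum s, appending s after each element
def altStep (row : List Int) : List Int :=
  (row.foldl (fun (p : List Int × Int) x => (p.1 ++ [p.2 + x], p.2 + x)) ([], 0)).1

def fide_pop_alt (k : Int) (n : Int) : List Int :=
  altStep^[k.toNat] (PySem.List.pyRange 1 (n + 1) 1)

-- ===== PRECONDITION & SPEC =====
-- Pre_ excludes k < 0, on which Python A recurses forever (RecursionError).
def Pre_fide_pop (k : Int) (n : Int) : Prop := 0 ≤ k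
instance (k : Int) (n : Int) : Decidable (Pre_fide_pop k n) := by unfold Pre_fide_pop; infer_instance
def pvWitness_fide_pop : Int × Int := (2, 5)

def Spec_fide_pop (k : Int) (n : Int) (out : List Int) : Prop := out = fide_pop_alt k n
instance (k : Int) (n : Int) (out : List Int) : Decidable (Spec_fide_pop k n out) := by unfold Spec_fide_pop; infer_instance

-- ===== CLAIM (what is proved, stated in full; the proofs are below) =====
def Claim_equal_fide_pop : Prop := ∀ (k : Int) (n : Int), Dom_fide_pop k n → Pre_fide_pop k n → Spec_fide_pop k n (fide_pop k n)

-- ===== LEMMAS AND PROOFS =====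

-- B's foldl with running sum, generalized over the accumulator
theorem altStep_foldl (xs : List Int) (out : List Int) (s : Int) :
    xs.foldl (fun (p : List Int × Int) x => (p.1 ++ [p.2 + x], p.2 + x)) (out, s)
      = (out ++ (List.range xs.length).map (fun j => s + (xs.take (j + 1)).sum), s + xs.sum) := by
  induction xs generalizing out s with
  | nil => simp
  | cons x xs ih =>
    rw [List.foldl_cons, ih, Prod.mk.injEq]
    refine ⟨?_, by simp; ring⟩
    rw [List.length_cons, List.range_succ_eq_map, List.map_cons, List.map_map]
    simp only [List.take_succ_cons, List.sum_cons, List.take_zero, List.sum_nil,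
      add_zero, zero_add, List.append_assoc, List.singleton_append]
    congr 1
    congr 1
    apply List.map_congr_left
    intro j _
    simp only [Function.comp_apply, Nat.succ_eq_add_one]
    ring

theorem altStep_eq_map (xs : List Int) :
    altStep xs = (List.range xs.length).map (fun j => (xs.take (j + 1)).sum) := by
  simp [altStep, altStep_foldl]

-- A's inner loop equals one running-prefix-sum level, when the list has length n.toNat
theorem stepA_eq_altStep (n : Int) (xs : List Int) (h : xs.length = n.toNat) :
    (PySem.List.pyRange 0 n 1).foldl
        (fun newList i => newList ++ [(PySem.List.slice xs none (some (i + 1))).sum]) []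
      = altStep xs := by
  rw [PySem.List.foldl_append_singleton_eq_map, PySem.List.pyRange_one, List.map_map,
    altStep_eq_map, h]
  simp only [Int.sub_zero]
  apply List.map_congr_left
  intro j _
  simp only [Function.comp]
  have h0 : (0:Int) ≤ 0 + (j:Int) + 1 := by omega
  have h1 : ((0:Int) + (j:Int) + 1).toNat = j + 1 := by omega
  rw [PySem.List.slice_to _ h0, h1]

theorem length_fideGoA (m : Nat) (n : Int) : (fideGoA m n).length = n.toNat := by
  induction m with
  | zero => simp [fideGoA, PySem.List.length_pyRange_one]
  | succ m ih =>
    simp only [fideGoA]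
    rw [stepA_eq_altStep n _ ih, altStep_eq_map]
    simp [ih]

theorem fideGoA_eq_iterate (m : Nat) (n : Int) :
    fideGoA m n = altStep^[m] (PySem.List.pyRange 1 (n + 1) 1) := by
  induction m with
  | zero => rfl
  | succ m ih =>
    simp only [fideGoA, Function.iterate_succ_apply']
    rw [stepA_eq_altStep n _ (length_fideGoA m n), ih]

-- ===== VERDICT (by name: the statement is the Claim_ definition above) =====
theorem fide_pop_spec : Claim_equal_fide_pop := by
  intro k n _ _
  unfold Spec_fide_pop fide_pop fide_pop_alt
  exact fideGoA_eq_iterate k.toNat n
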